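-- pv_equiv track=rewrite | github.com/edsonboldrini/uva-problems | uva01062/1062.py | solve
-- ===== SOURCE A (Python) =====
-- def solve(containers):
--     stacks = []
--     for c in containers:
--         pushed = False
--         for j in range(len(stacks)):
--             if (stacks[j][-1] >= c):
--                 pushed = True
--                 stacks[j].append(c)
--                 break
--         if (not pushed):
--             stacks.append([c])
--
--     return len(stacks)
-- ===== SOURCE B (Python) =====
-- def solve(containers):
--     # patience-sorting tails: keep only each stack's top; binary search for the
--     # leftmost top >= c (tops stay strictly increasing), replace it or append.
--     tops = []
--     for c in containers:
--         lo, hi = 0, len(tops)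
--         while lo < hi:
--             mid = (lo + hi) // 2
--             if tops[mid] < c:
--                 lo = mid + 1
--             else:
--                 hi = mid
--         if lo == len(tops):
--             tops.append(c)
--         else:
--             tops[lo] = c
--     return len(tops)
-- ===== Notes on version B (the rewrite author's own statement) =====
-- stated objective: alternative
-- what changed: Replaces the list of full stacks with a tails array of stack tops (strictly increasing) and finds the target stack by binary search instead of a linear scan over all stacks; O(n log k) vs O(n*k) comparisons, though with k bounded by the alphabet the measured times are similar.
import Mathlib
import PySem

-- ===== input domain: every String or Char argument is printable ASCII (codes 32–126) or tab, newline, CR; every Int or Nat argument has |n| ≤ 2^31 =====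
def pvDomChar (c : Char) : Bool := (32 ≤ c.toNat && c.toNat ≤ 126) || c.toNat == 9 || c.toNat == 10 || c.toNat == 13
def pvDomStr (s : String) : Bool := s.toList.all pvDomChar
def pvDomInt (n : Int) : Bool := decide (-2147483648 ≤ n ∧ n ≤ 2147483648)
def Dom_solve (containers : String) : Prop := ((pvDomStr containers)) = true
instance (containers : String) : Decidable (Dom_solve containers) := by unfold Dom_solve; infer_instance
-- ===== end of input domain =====

-- B replaces A's linear scan over full sts by a binary search on the strictly
-- increasing array of stack tops (patience "tails"): asymptotically faster.


-- ===== PORT A =====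
-- inner 'for j in range(len(sts)) … break': first stack whose top ≥ c gets c appended.
-- sts[j][-1]: every stack in the list is nonempty by construction, so the
-- getLastD default ' ' is never consulted (exact on reachable states).
def pushFirstA (c : Char) : List (List Char) → Option (List (List Char))
  | [] => none
  | s :: rest =>
    if c ≤ s.getLastD ' ' then some ((s ++ [c]) :: rest)
    else
      match pushFirstA c rest with
      | some rest' => some (s :: rest')
      | none => none

def stepA (sts : List (List Char)) (c : Char) : List (List Char) :=
  match pushFirstA c sts with
  | some st => st
  | none => sts ++ [[c]]

def solve (containers : String) : Int :=
  ((containers.toList.foldl stepA []).length : Int)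

-- ===== PORT B =====
-- the hand-written while-loop binary search of Source B (tops[mid] is always in range,
-- so the getD default c is never consulted).
-- fuel = hi - lo bounds the iteration count; it only makes the loop structurally
-- total and never changes the result (see bsearch_correct below).
def bsearchB (tops : List Char) (c : Char) : Nat → Nat → Nat → Nat
  | 0, lo, _ => lo
  | fuel + 1, lo, hi =>
    if lo < hi then
      let mid := (lo + hi) / 2
      if tops.getD mid c < c then bsearchB tops c fuel (mid + 1) hi
      else bsearchB tops c fuel lo mid
    else lo

def stepB (tops : List Char) (c : Char) : List Char :=
  let lo := bsearchB tops c tops.length 0 tops.length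
  if lo = tops.length then tops ++ [c] else tops.set lo c

def solve_alt (containers : String) : Int :=
  ((containers.toList.foldl stepB []).length : Int)

-- ===== PRECONDITION & SPEC =====
def Spec_solve (containers : String) (out : Int) : Prop := out = solve_alt containers
instance (containers : String) (out : Int) : Decidable (Spec_solve containers out) := by unfold Spec_solve; infer_instance

-- ===== CLAIM (what is proved, stated in full; the proofs are below) =====
def Claim_equal_solve : Prop := ∀ (containers : String), Dom_solve containers → Spec_solve containers (solve containers)

-- ===== LEMMAS AND PROOFS =====

-- the tops of A's sts
def topsOf (sts : List (List Char)) : List Char := sts.map (fun s => s.getLastD ' ')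

-- linear search: first index whose top is ≥ c (length if none)
def lsearch : List Char → Char → Nat
  | [], _ => 0
  | t :: ts, c => if c ≤ t then 0 else lsearch ts c + 1

-- the common abstract step on the tops array
def stepT (tops : List Char) (c : Char) : List Char :=
  if lsearch tops c = tops.length then tops ++ [c] else tops.set (lsearch tops c) c

theorem lsearch_le (ts : List Char) (c : Char) : lsearch ts c ≤ ts.length := by
  induction ts with
  | nil => simp [lsearch]
  | cons t ts ih => by_cases h : c ≤ t <;> simp [lsearch, h]; omega

theorem lsearch_lt_spec (ts : List Char) (c : Char) :
    ∀ k, k < lsearch ts c → ts.getD k c < c := by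
  induction ts with
  | nil => simp [lsearch]
  | cons t ts ih =>
    intro k hk
    by_cases h : c ≤ t
    · simp [lsearch, h] at hk
    · cases k with
      | zero => simpa using lt_of_not_ge h
      | succ k =>
        simp only [lsearch, if_neg h] at hk
        simpa using ih k (by omega)

theorem lsearch_ge (ts : List Char) (c : Char) (h : lsearch ts c < ts.length) :
    c ≤ ts.getD (lsearch ts c) c := by
  induction ts with
  | nil => simp [lsearch] at h
  | cons t ts ih =>
    by_cases hc : c ≤ t
    · simp [lsearch, hc]
    · simp only [lsearch, if_neg hc] at h ⊢
      simpa using ih (by simpa using Nat.lt_of_succ_lt_succ h)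

theorem lsearch_unique (ts : List Char) (c : Char) (j : Nat)
    (hle : j ≤ ts.length)
    (hlt : ∀ k, k < j → ts.getD k c < c)
    (hge : j < ts.length → c ≤ ts.getD j c) :
    j = lsearch ts c := by
  rcases lt_trichotomy j (lsearch ts c) with h | h | h
  · have h1 := lsearch_lt_spec ts c j h
    have h2 := hge (lt_of_lt_of_le h (lsearch_le ts c))
    exact absurd h2 (not_le_of_gt h1)
  · exact h
  · have h1 := hlt _ h
    have h2 := lsearch_ge ts c (lt_of_lt_of_le h hle)
    exact absurd h2 (not_le_of_gt h1)

theorem getD_lt_of_sorted (ts : List Char) (c : Char)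
    (hs : ts.Pairwise (· < ·)) {i j : Nat} (hij : i < j) (hj : j < ts.length) :
    ts.getD i c < ts.getD j c := by
  rw [List.pairwise_iff_getElem] at hs
  have hi : i < ts.length := lt_trans hij hj
  rw [List.getD_eq_getElem ts c hi, List.getD_eq_getElem ts c hj]
  exact hs i j hi hj hij

theorem bsearch_correct (ts : List Char) (c : Char) (hs : ts.Pairwise (· < ·)) :
    ∀ n lo hi, hi - lo ≤ n → lo ≤ hi → hi ≤ ts.length →
    (∀ k, k < lo → ts.getD k c < c) →
    (∀ k, hi ≤ k → k < ts.length → c ≤ ts.getD k c) →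
    bsearchB ts c n lo hi = lsearch ts c := by
  intro n
  induction n with
  | zero =>
    intro lo hi h0 h1 h2 h3 h4
    have : lo = hi := by omega
    subst this
    exact lsearch_unique ts c lo h2 h3 (fun h => h4 lo (le_refl lo) h)
  | succ n ih =>
    intro lo hi h0 h1 h2 h3 h4
    by_cases hlh : lo < hi
    · rw [bsearchB, if_pos hlh]
      simp only []
      set mid := (lo + hi) / 2 with hmid
      have hm1 : lo ≤ mid := by omega
      have hm2 : mid < hi := by omega
      by_cases hc : ts.getD mid c < c
      · rw [if_pos hc]
        apply ih (mid + 1) hi (by omega) (by omega) h2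
        · intro k hk
          rcases Nat.lt_or_ge k mid with h | h
          · exact lt_trans (getD_lt_of_sorted ts c hs h (by omega)) hc
          · have : k = mid := by omega
            subst this; exact hc
        · exact h4
      · rw [if_neg hc]
        apply ih lo mid (by omega) (by omega) (by omega) h3
        intro k hk hk2
        rcases Nat.lt_or_ge mid k with h | h
        · exact le_trans (le_of_not_gt hc) (le_of_lt (getD_lt_of_sorted ts c hs h hk2))
        · have : k = mid := by omega
          subst this; exact le_of_not_gt hc
    · rw [bsearchB, if_neg hlh]
      have : lo = hi := by omega
      subst this
      exact lsearch_unique ts c lo h2 h3 (fun h => h4 lo (le_refl lo) h)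

theorem stepB_eq_stepT (ts : List Char) (c : Char) (hs : ts.Pairwise (· < ·)) :
    stepB ts c = stepT ts c := by
  have hb : bsearchB ts c ts.length 0 ts.length = lsearch ts c :=
    bsearch_correct ts c hs ts.length 0 ts.length (by omega) (by omega) (le_refl _)
      (by omega) (by omega)
  simp only [stepB, stepT, hb]

theorem stepT_cons (t : Char) (ts : List Char) (c : Char) :
    stepT (t :: ts) c = if c ≤ t then c :: ts else t :: stepT ts c := by
  by_cases h : c ≤ t
  · simp [stepT, lsearch, h]
  · simp only [stepT, lsearch, if_neg h, List.length_cons, Nat.add_right_cancel_iff]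
    by_cases he : lsearch ts c = ts.length
    · simp [he]
    · simp [he, List.set_cons_succ]

theorem mem_stepT (ts : List Char) (c x : Char) (hx : x ∈ stepT ts c) :
    x = c ∨ x ∈ ts := by
  induction ts with
  | nil => simp [stepT, lsearch] at hx; simp [hx]
  | cons t ts ih =>
    rw [stepT_cons] at hx
    by_cases h : c ≤ t
    · rw [if_pos h] at hx
      rcases List.mem_cons.mp hx with h1 | h1
      · exact Or.inl h1
      · exact Or.inr (List.mem_cons_of_mem _ h1)
    · rw [if_neg h] at hx
      rcases List.mem_cons.mp hx with h1 | h1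
      · exact Or.inr (by simp [h1])
      · rcases ih h1 with h2 | h2
        · exact Or.inl h2
        · exact Or.inr (List.mem_cons_of_mem _ h2)

theorem sorted_stepT (ts : List Char) (c : Char) (hs : ts.Pairwise (· < ·)) :
    (stepT ts c).Pairwise (· < ·) := by
  induction ts with
  | nil => simp [stepT, lsearch]
  | cons t ts ih =>
    rw [List.pairwise_cons] at hs
    obtain ⟨ht, hts⟩ := hs
    rw [stepT_cons]
    by_cases h : c ≤ t
    · rw [if_pos h]
      exact List.pairwise_cons.mpr ⟨fun x hx => lt_of_le_of_lt h (ht x hx), hts⟩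
    · rw [if_neg h]
      refine List.pairwise_cons.mpr ⟨fun x hx => ?_, ih hts⟩
      rcases mem_stepT ts c x hx with h1 | h1
      · subst h1; exact lt_of_not_ge h
      · exact ht x h1

theorem topsOf_stepA (sts : List (List Char)) (c : Char) :
    topsOf (stepA sts c) = stepT (topsOf sts) c := by
  induction sts with
  | nil => simp [stepA, pushFirstA, topsOf, stepT, lsearch]
  | cons s rest ih =>
    by_cases h : c ≤ s.getLastD ' '
    · have hstep : stepA (s :: rest) c = (s ++ [c]) :: rest := by
        simp only [stepA, pushFirstA, if_pos h]
      rw [hstep]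
      unfold topsOf
      simp only [List.map_cons]
      rw [List.getLastD_concat, stepT_cons, if_pos h]
    · have hstep : stepA (s :: rest) c = s :: stepA rest c := by
        simp only [stepA, pushFirstA, if_neg h]
        cases pushFirstA c rest <;> simp
      rw [hstep]
      show (fun s => s.getLastD ' ') s :: topsOf (stepA rest c)
        = stepT ((fun s => s.getLastD ' ') s :: topsOf rest) c
      rw [stepT_cons, if_neg h, ih]

theorem fold_eq (cs : List Char) :
    ∀ sts : List (List Char), (topsOf sts).Pairwise (· < ·) →
    topsOf (cs.foldl stepA sts) = cs.foldl stepB (topsOf sts) := by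
  induction cs with
  | nil => intro sts _; rfl
  | cons c cs ih =>
    intro sts hs
    simp only [List.foldl_cons]
    rw [stepB_eq_stepT _ _ hs, ← topsOf_stepA]
    exact ih _ (by rw [topsOf_stepA]; exact sorted_stepT _ _ hs)

-- ===== VERDICT (by name: the statement is the Claim_ definition above) =====
theorem solve_spec : Claim_equal_solve := by
  intro containers _
  show solve containers = solve_alt containers
  unfold solve solve_alt
  have h := fold_eq containers.toList [] (by simp [topsOf])
  have hl : (containers.toList.foldl stepA []).length
      = (containers.toList.foldl stepB (topsOf [])).length := by
    rw [← h]; simp [topsOf]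
  simp only [topsOf, List.map_nil] at hl
  rw [hl]
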